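-- pv_equiv track=rewrite | github.com/highly-illogical/project-euler | python/p108.py | nsols
-- ===== SOURCE A (Python) =====
-- def nsols(n):
--     s = 0
--     for i in range(n+1, 2*n+1):
--         num = i-n
--         den = i*n
--         if den%num == 0:
--             s += 1
--     return s
-- ===== SOURCE B (Python) =====
-- def nsols(n):
--     # count solutions of 1/x + 1/y = 1/n with x <= y: (tau(n^2)+1)//2,
--     # with tau(n^2) computed from the prime factorization of n by trial division.
--     if n <= 0:
--         return 0
--     tau = 1
--     m = n
--     p = 2
--     while p * p <= m:
--         if m % p == 0:
--             e = 0
--             while m % p == 0: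
--                 m //= p
--                 e += 1
--             tau *= 2 * e + 1
--         p += 1
--     if m > 1:
--         tau *= 3
--     return (tau + 1) // 2
-- ===== Notes on version B (the rewrite author's own statement) =====
-- stated objective: faster
-- what changed: Replaced A's O(n) scan over i in (n,2n] testing (i*n) % (i-n) == 0 by trial-division factorization of n: the answer is (tau(n^2)+1)//2 with tau(n^2) = prod(2e_i+1) over the prime exponents of n, computed in O(sqrt(n)).
import Mathlib
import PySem

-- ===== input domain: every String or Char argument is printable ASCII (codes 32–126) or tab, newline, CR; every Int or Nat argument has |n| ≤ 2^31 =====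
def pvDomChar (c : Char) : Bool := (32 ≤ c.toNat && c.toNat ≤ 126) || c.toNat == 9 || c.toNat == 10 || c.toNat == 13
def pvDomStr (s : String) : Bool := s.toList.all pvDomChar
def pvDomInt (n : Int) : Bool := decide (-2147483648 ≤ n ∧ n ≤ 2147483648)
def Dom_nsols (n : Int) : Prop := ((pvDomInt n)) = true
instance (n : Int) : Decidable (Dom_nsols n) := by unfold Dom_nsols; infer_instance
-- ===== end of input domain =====

-- B replaces A's O(n) scan by trial-division factorization: answer = (τ(n²)+1)//2 (faster).

-- ===== PORT A =====
def nsols (n : Int) : Int :=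
  (PySem.List.pyRange (n + 1) (2 * n + 1) 1).foldl
    (fun s i =>
      let num := i - n
      let den := i * n
      if PySem.Int.mod den num == 0 then s + 1 else s) 0

-- ===== PORT B =====
-- inner loop of Source B: 'while m % p == 0: m //= p; e += 1'; returns (e, final m).
-- fuel (≥ m at every call) only makes the recursion structural; it never runs out.
def nsolsDivOut (p fuel m : Nat) : Nat × Nat :=
  match fuel with
  | 0 => (0, m)
  | fuel + 1 =>
    if 0 < m ∧ 2 ≤ p ∧ m % p = 0 then
      let r := nsolsDivOut p fuel (m / p)
      (r.1 + 1, r.2)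
    else (0, m)

-- outer loop of Source B: 'while p * p <= m: …; p += 1'; returns (tau, final m).
-- fuel (≥ m + 1 - p at every call) only makes the recursion structural; it never runs out.
def nsolsLoop (fuel tau p m : Nat) : Nat × Nat :=
  match fuel with
  | 0 => (tau, m)
  | fuel + 1 =>
    if p * p ≤ m then
      if m % p = 0 then
        let r := nsolsDivOut p m m
        nsolsLoop fuel (tau * (2 * r.1 + 1)) (p + 1) r.2
      else nsolsLoop fuel tau (p + 1) m
    else (tau, m)

def nsols_alt (n : Int) : Int :=
  if n ≤ 0 then 0
  else
    let r := nsolsLoop (n.toNat + 1) 1 2 n.toNat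
    let tau := if 1 < r.2 then r.1 * 3 else r.1
    (((tau + 1) / 2 : Nat) : Int)

-- ===== PRECONDITION & SPEC =====
def Spec_nsols (n : Int) (out : Int) : Prop := out = nsols_alt n
instance (n : Int) (out : Int) : Decidable (Spec_nsols n out) := by unfold Spec_nsols; infer_instance

-- ===== CLAIM (what is proved, stated in full; the proofs are below) =====
def Claim_equal_nsols : Prop := ∀ (n : Int), Dom_nsols n → Spec_nsols n (nsols n)

-- ===== LEMMAS AND PROOFS =====

-- divOut returns the exponent of p in m and the p-free cofactor (any fuel ≥ m)
theorem nsolsDivOut_spec (p fuel m : Nat) (hp : 2 ≤ p) (hm : 0 < m) (hf : m ≤ fuel) :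
    m = p ^ (nsolsDivOut p fuel m).1 * (nsolsDivOut p fuel m).2 ∧
      ¬ p ∣ (nsolsDivOut p fuel m).2 ∧ 0 < (nsolsDivOut p fuel m).2 := by
  induction fuel generalizing m with
  | zero => omega
  | succ fuel ih =>
      rw [nsolsDivOut]
      by_cases hc : 0 < m ∧ 2 ≤ p ∧ m % p = 0
      · rw [if_pos hc]
        have hdvd : p ∣ m := Nat.dvd_of_mod_eq_zero hc.2.2
        have hpos : 0 < m / p := Nat.div_pos (Nat.le_of_dvd hm hdvd) (by omega)
        have hlt : m / p < m := Nat.div_lt_self hm (by omega)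
        obtain ⟨h1, h2, h3⟩ := ih (m / p) hpos (by omega)
        refine ⟨?_, h2, h3⟩
        have heq : m = p * (m / p) := (Nat.mul_div_cancel' hdvd).symm
        simp only []
        conv_lhs => rw [heq, h1]
        rw [pow_succ]
        ring
      · rw [if_neg hc]
        have hnd : ¬ p ∣ m := by
          intro hd
          exact hc ⟨hm, hp, Nat.mod_eq_zero_of_dvd hd⟩
        simpa using ⟨hnd, hm⟩

-- once m < p², with no divisor of m in [2, p), m is 1 or prime; value of the post-loop expression
theorem nsols_base (tau p m : Nat) (_hp : 2 ≤ p) (hm : 0 < m)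
    (hinv : ∀ q, 2 ≤ q → q < p → ¬ q ∣ m) (hlt : m < p * p) :
    (if 1 < m then tau * 3 else tau) = tau * (m ^ 2).divisors.card := by
  rcases Nat.lt_or_ge 1 m with h1 | h1
  · have hpm : m.Prime := by
      by_contra hnp
      have hsq := Nat.minFac_sq_le_self (by omega) hnp
      have h2 := (Nat.minFac_prime (by omega : m ≠ 1)).two_le
      have hdm := Nat.minFac_dvd m
      have hfp : m.minFac < p := by
        rcases Nat.lt_or_ge m.minFac p with hlt' | hge'
        · exact hlt'
        · have hmul : p * p ≤ m.minFac * m.minFac := Nat.mul_le_mul hge' hge'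
          have hsq' : m.minFac * m.minFac ≤ m := by rw [← sq]; exact hsq
          omega
      exact hinv m.minFac h2 hfp hdm
    have : (m ^ 2).divisors.card = 3 := by
      rw [Nat.divisors_prime_pow hpm, Finset.card_map, Finset.card_range]
    simp [h1, this]
  · have hm1 : m = 1 := by omega
    subst hm1
    simp

-- loop invariant: with no divisor of m in [2, p) and enough fuel, the completed computation
-- yields tau * τ(m²)
theorem nsolsLoop_spec (fuel tau p m : Nat) (hp : 2 ≤ p) (hm : 0 < m)
    (hinv : ∀ q, 2 ≤ q → q < p → ¬ q ∣ m) (hf : m + 1 ≤ fuel + p) :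
    (if 1 < (nsolsLoop fuel tau p m).2 then (nsolsLoop fuel tau p m).1 * 3
      else (nsolsLoop fuel tau p m).1) = tau * (m ^ 2).divisors.card := by
  induction fuel generalizing tau p m with
  | zero =>
      rw [nsolsLoop]
      have hpsq : p ≤ p * p := Nat.le_mul_of_pos_left p (by omega)
      exact nsols_base tau p m hp hm hinv (by omega)
  | succ fuel ih =>
      rw [nsolsLoop]
      by_cases hpp : p * p ≤ m
      · have hpsq : p ≤ p * p := Nat.le_mul_of_pos_left p (by omega)
        rw [if_pos hpp]
        by_cases hmp : m % p = 0
        · rw [if_pos hmp]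
          have hdvd : p ∣ m := Nat.dvd_of_mod_eq_zero hmp
          obtain ⟨hfac, hnd, hmr⟩ := nsolsDivOut_spec p m m hp hm le_rfl
          have hppr : p.Prime := by
            rw [Nat.prime_def_lt]
            refine ⟨hp, ?_⟩
            intro d hdlt hdp
            match d, hdp with
            | 0, hdp => exact absurd (Nat.eq_zero_of_zero_dvd hdp) (by omega)
            | 1, _ => rfl
            | (d+2), hdp =>
                exact absurd (hdp.trans hdvd) (hinv (d+2) (by omega) hdlt)
          have hmr_dvd : (nsolsDivOut p m m).2 ∣ m :=
            ⟨p ^ (nsolsDivOut p m m).1, by nth_rewrite 1 [hfac]; ring⟩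
          have hinv' : ∀ q, 2 ≤ q → q < p + 1 → ¬ q ∣ (nsolsDivOut p m m).2 := by
            intro q h2 hq hdq
            rcases Nat.lt_or_ge q p with hlt | hge
            · exact hinv q h2 hlt (hdq.trans hmr_dvd)
            · have : q = p := by omega
              exact hnd (this ▸ hdq)
          have hcop : Nat.Coprime (p ^ (2 * (nsolsDivOut p m m).1)) ((nsolsDivOut p m m).2 ^ 2) :=
            Nat.Coprime.pow _ _ ((Nat.Prime.coprime_iff_not_dvd hppr).mpr hnd)
          have hcard : (m ^ 2).divisors.card
              = (2 * (nsolsDivOut p m m).1 + 1) * (((nsolsDivOut p m m).2) ^ 2).divisors.card := by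
            have hsq : m ^ 2 = p ^ (2 * (nsolsDivOut p m m).1) * (nsolsDivOut p m m).2 ^ 2 := by
              nth_rewrite 1 [hfac]; ring
            rw [hsq, Nat.Coprime.card_divisors_mul hcop,
              Nat.divisors_prime_pow hppr, Finset.card_map, Finset.card_range]
          have hle := Nat.le_of_dvd hm hmr_dvd
          simp only []
          rw [ih (tau * (2 * (nsolsDivOut p m m).1 + 1)) (p + 1) (nsolsDivOut p m m).2
            (by omega) hmr hinv' (by omega), hcard]
          ring
        · rw [if_neg hmp]
          have hinv' : ∀ q, 2 ≤ q → q < p + 1 → ¬ q ∣ m := by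
            intro q h2 hq hdq
            rcases Nat.lt_or_ge q p with hlt | hge
            · exact hinv q h2 hlt hdq
            · have : q = p := by omega
              exact hmp (Nat.mod_eq_zero_of_dvd (this ▸ hdq))
          exact ih tau (p + 1) m (by omega) hm hinv' (by omega)
      · rw [if_neg hpp]
        exact nsols_base tau p m hp hm hinv (by omega)

-- pairing d ↦ n²/d: divisors of n² that are ≤ n are exactly half of all, counting n once
theorem pairing (N : Nat) (hN : 0 < N) :
    ((N ^ 2).divisors.filter (· ≤ N)).card * 2 = (N ^ 2).divisors.card + 1 := by
  have hN2 : N ^ 2 ≠ 0 := by positivity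
  have hbij : ((N ^ 2).divisors.filter (· ≤ N)).card
      = ((N ^ 2).divisors.filter (fun d => N ≤ d)).card := by
    apply Finset.card_nbij' (i := fun d => N ^ 2 / d) (j := fun d => N ^ 2 / d)
    · intro d hd
      simp only [Finset.coe_filter, Set.mem_setOf_eq, Nat.mem_divisors] at hd ⊢
      obtain ⟨⟨hdvd, _⟩, hle⟩ := hd
      have hdpos : 0 < d := Nat.pos_of_dvd_of_pos hdvd (Nat.pos_of_ne_zero hN2)
      refine ⟨⟨Nat.div_dvd_of_dvd hdvd, hN2⟩, ?_⟩
      rw [Nat.le_div_iff_mul_le hdpos]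
      calc N * d ≤ N * N := Nat.mul_le_mul_left N hle
        _ = N ^ 2 := (sq N).symm
    · intro d hd
      simp only [Finset.coe_filter, Set.mem_setOf_eq, Nat.mem_divisors] at hd ⊢
      obtain ⟨⟨hdvd, _⟩, hge⟩ := hd
      refine ⟨⟨Nat.div_dvd_of_dvd hdvd, hN2⟩, ?_⟩
      apply Nat.div_le_of_le_mul
      calc N ^ 2 = N * N := sq N
        _ ≤ d * N := Nat.mul_le_mul_right N hge
    · intro d hd
      simp only [Finset.coe_filter, Set.mem_setOf_eq, Nat.mem_divisors] at hd
      exact Nat.div_div_self hd.1.1 hN2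
    · intro d hd
      simp only [Finset.coe_filter, Set.mem_setOf_eq, Nat.mem_divisors] at hd
      exact Nat.div_div_self hd.1.1 hN2
  have hins : (N ^ 2).divisors.filter (fun d => N ≤ d)
      = insert N ((N ^ 2).divisors.filter (fun d => ¬ d ≤ N)) := by
    ext d
    simp only [Finset.mem_filter, Finset.mem_insert, Nat.mem_divisors, not_le]
    constructor
    · rintro ⟨hd, hle⟩
      rcases Nat.eq_or_lt_of_le hle with heq | hlt
      · exact Or.inl heq.symm
      · exact Or.inr ⟨hd, hlt⟩
    · rintro (rfl | ⟨hd, hlt⟩)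
      · exact ⟨⟨dvd_pow_self _ (by omega), hN2⟩, le_refl _⟩
      · exact ⟨hd, Nat.le_of_lt hlt⟩
  have hnotmem : N ∉ (N ^ 2).divisors.filter (fun d => ¬ d ≤ N) := by
    simp
  have hsplit := Finset.card_filter_add_card_filter_not
    (s := (N ^ 2).divisors) (p := fun d => d ≤ N)
  rw [hbij, hins, Finset.card_insert_of_notMem hnotmem] at hsplit ⊢
  omega

-- a Bool-countP over List.range equals the card of the filtered Finset.range
theorem countP_range_filter (N : ℕ) (p : ℕ → Prop) [DecidablePred p] :
    (List.range N).countP (fun k => decide (p k)) = ((Finset.range N).filter p).card := by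
  induction N with
  | zero => simp
  | succ N ih =>
      rw [List.range_succ, List.countP_append, Finset.range_add_one, Finset.filter_insert]
      by_cases hp : p N
      · rw [if_pos hp, Finset.card_insert_of_notMem (by simp)]
        simp [hp, ih]
      · rw [if_neg hp]
        simp [hp, ih]

-- counting k < N with (k+1) ∣ N² is counting divisors of N² that are ≤ N
theorem count_eq_lo (N : ℕ) (hN : 0 < N) :
    (List.range N).countP (fun k => decide ((k + 1) ∣ N ^ 2))
      = ((N ^ 2).divisors.filter (· ≤ N)).card := by
  rw [countP_range_filter]
  apply Finset.card_nbij' (i := fun k => k + 1) (j := fun d => d - 1)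
  · intro k hk
    simp only [Finset.coe_filter, Set.mem_setOf_eq, Finset.mem_range, Nat.mem_divisors] at hk ⊢
    exact ⟨⟨hk.2, by positivity⟩, by omega⟩
  · intro d hd
    simp only [Finset.coe_filter, Set.mem_setOf_eq, Finset.mem_range, Nat.mem_divisors] at hd ⊢
    have hdpos : 0 < d := Nat.pos_of_dvd_of_pos hd.1.1 (by positivity)
    refine ⟨by omega, ?_⟩
    rw [Nat.sub_add_cancel hdpos]
    exact hd.1.1
  · intro k _
    simp
  · intro d hd
    simp only [Finset.coe_filter, Set.mem_setOf_eq, Nat.mem_divisors] at hd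
    have hdpos : 0 < d := Nat.pos_of_dvd_of_pos hd.1.1 (by positivity)
    simp only []
    omega

-- A's loop counts the divisors of n² that are ≤ n
theorem nsols_count (n : Int) (hn : 0 < n) :
    nsols n = (((n.toNat ^ 2).divisors.filter (· ≤ n.toNat)).card : Int) := by
  unfold nsols
  rw [PySem.List.pyRange_one, List.foldl_map, PySem.List.foldl_if_add_one]
  have hlen : (2 * n + 1 - (n + 1)).toNat = n.toNat := by omega
  rw [hlen]
  have hcongr : (List.range n.toNat).countP
        (fun (k : ℕ) => PySem.Int.mod ((n + 1 + (k : Int)) * n) ((n + 1 + (k : Int)) - n) == 0)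
      = (List.range n.toNat).countP (fun k => decide ((k + 1) ∣ n.toNat ^ 2)) := by
    apply List.countP_congr
    intro k _
    simp only [beq_iff_eq, decide_eq_true_eq]
    have hnum : (n + 1 + (k : Int)) - n = (k : Int) + 1 := by ring
    have hden : (n + 1 + (k : Int)) * n = ((k : Int) + 1) * n + n ^ 2 := by ring
    rw [hnum, hden]
    rw [PySem.Int.mod_eq_zero_iff_dvd]
    have h2 : (((k : Int) + 1) ∣ ((k : Int) + 1) * n + n ^ 2) ↔ (((k : Int) + 1) ∣ n ^ 2) :=
      dvd_add_right (dvd_mul_right _ _)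
    have h3 : (((k : Int) + 1) ∣ n ^ 2) ↔ ((k + 1) ∣ n.toNat ^ 2) := by
      rw [show ((k : Int) + 1) = ((k + 1 : ℕ) : Int) by push_cast; ring,
        show (n : Int) ^ 2 = (((n.toNat ^ 2 : ℕ) : Int)) by
          rw [Int.natCast_pow, Int.toNat_of_nonneg hn.le]]
      exact Int.natCast_dvd_natCast
    exact h2.trans h3
  rw [hcongr, count_eq_lo n.toNat (by omega)]
  simp

-- ===== VERDICT (by name: the statement is the Claim_ definition above) =====
theorem nsols_spec : Claim_equal_nsols := by
  intro n _
  unfold Spec_nsols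
  by_cases hn : n ≤ 0
  · unfold nsols nsols_alt
    rw [PySem.List.pyRange_one_eq_nil (by omega)]
    simp [hn]
  · push Not at hn
    have hN : 0 < n.toNat := by omega
    have hloop := nsolsLoop_spec (n.toNat + 1) 1 2 n.toNat (by omega) hN
      (by intro q h1 h2; exact absurd h1 (by omega)) (by omega)
    have hpair := pairing n.toNat hN
    rw [nsols_count n hn]
    unfold nsols_alt
    rw [if_neg (by omega)]
    simp only []
    rw [one_mul] at hloop
    rw [hloop]
    omega
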